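-- pv_equiv track=rewrite | github.com/Elliot-Roberts/google-foobar | challenge_final/all_code.py | solve_piece
-- ===== SOURCE A (Python) =====
-- import itertools as it
--
-- def solve_piece(options, progress, length):
--     if len(progress[0]) > length:
--         return [tuple(progress[1])]
--
--     ref = [x[::-1] for x in it.product((0, 1), repeat=4)]
--
--     results = []
--     for x in options[0]:
--         bit = ref[x]
--         if progress[0][-1] == bit[0] and progress[1][-1] == bit[2]:
--             results += solve_piece(options[1:],
--                                    [progress[0] + [bit[1]], progress[1] + [bit[3]]],
--                                    length)
--     return results
-- ===== SOURCE B (Python) =====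
-- def solve_piece(options, progress, length):
--     n = length - len(progress[0]) + 1
--     if n <= 0:
--         return [tuple(progress[1])]
--     states = [(progress[0][-1], progress[1][-1], list(progress[1]))]
--     for row in options[:n]:
--         states = [((x // 2) % 2, (x // 8) % 2, out + [(x // 8) % 2])
--                   for (a, c, out) in states
--                   for x in row
--                   if x % 2 == a and (x // 4) % 2 == c]
--     return [tuple(out) for (_, _, out) in states]
-- ===== Notes on version B (the rewrite author's own statement) =====
-- stated objective: simpler
-- what changed: The depth-first recursion over options is replaced by a single breadth-first fold over the first (length-len(progress[0])+1) option rows, carrying a frontier of (last-p0-bit, last-p1-bit, output) states, with bit extraction by arithmetic (x//2**i % 2) instead of the itertools.product reference table; leaf order is preserved because each level expands states left-to-right.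
-- outside the precondition, e.g. on solve_piece([[]], [[], []], 0): A returns [], B raises IndexError; on solve_piece([[3]], [[0], []], 1): A returns [], B raises IndexError
import Mathlib
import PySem

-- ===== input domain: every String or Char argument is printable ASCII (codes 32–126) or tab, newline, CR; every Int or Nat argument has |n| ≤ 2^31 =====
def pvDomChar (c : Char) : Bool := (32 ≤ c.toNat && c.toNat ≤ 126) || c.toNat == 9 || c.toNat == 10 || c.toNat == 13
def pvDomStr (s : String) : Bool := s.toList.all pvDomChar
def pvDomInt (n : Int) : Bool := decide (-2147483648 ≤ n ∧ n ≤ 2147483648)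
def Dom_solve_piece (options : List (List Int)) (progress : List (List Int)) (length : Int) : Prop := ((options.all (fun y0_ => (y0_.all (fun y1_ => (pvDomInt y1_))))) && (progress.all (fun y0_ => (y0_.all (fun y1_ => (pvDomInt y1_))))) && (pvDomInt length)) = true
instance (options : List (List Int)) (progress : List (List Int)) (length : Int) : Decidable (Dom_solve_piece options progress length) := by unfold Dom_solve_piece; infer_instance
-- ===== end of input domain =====

-- B replaces A's depth-first recursion by one breadth-first fold over the needed option rows
-- (frontier of (last-bit, last-bit, output) states, bits by arithmetic instead of a product table);
-- same return value, no speed claim.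

-- ===== PORT A =====
-- ref = [x[::-1] for x in it.product((0, 1), repeat=4)]
def pvProd01 : Nat → List (List Int)
  | 0 => [[]]
  | n + 1 => ([0, 1] : List Int).flatMap (fun d => (pvProd01 n).map (fun t => d :: t))

def pvRef : List (List Int) := (pvProd01 4).map List.reverse

-- literal port of A; Python raises where this returns a default (empty options / empty
-- progress[0]/progress[1] / ref[x] out of range) — Pre_solve_piece excludes those inputs.
mutual
def solve_piece (options : List (List Int)) (progress : List (List Int)) (length : Int) : List (List Int) :=
  let p0 := progress.getD 0 []
  let p1 := progress.getD 1 []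
  if length < (p0.length : Int) then [p1]          -- len(progress[0]) > length
  else
    match options with
    | [] => []                                      -- Python: options[0] raises IndexError here
    | row :: rest => spLoop length rest p0 p1 row []
termination_by (options.length, 1, 0)

-- the 'for x in options[0]: … results += …' loop of A
def spLoop (length : Int) (rest : List (List Int)) (p0 p1 : List Int)
    (row : List Int) (results : List (List Int)) : List (List Int) :=
  match row with
  | [] => results
  | x :: xs =>
    let bit := (PySem.List.pyGet? pvRef x).getD []
    if PySem.List.pyGetD p0 (-1) 0 = bit.getD 0 0 ∧ PySem.List.pyGetD p1 (-1) 0 = bit.getD 2 0 then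
      spLoop length rest p0 p1 xs
        (results ++ solve_piece rest [p0 ++ [bit.getD 1 0], p1 ++ [bit.getD 3 0]] length)
    else
      spLoop length rest p0 p1 xs results
termination_by (rest.length + 1, 0, row.length)
end

-- ===== PORT B =====
-- one breadth-first level: expand every state by every matching x of the row
def spStep (row : List Int) (states : List (Int × Int × List Int)) : List (Int × Int × List Int) :=
  states.flatMap (fun s =>
    (row.filter (fun x =>
        PySem.Int.mod x 2 == s.1 && PySem.Int.mod (PySem.Int.floordiv x 4) 2 == s.2.1)).map
      (fun x =>
        (PySem.Int.mod (PySem.Int.floordiv x 2) 2,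
         PySem.Int.mod (PySem.Int.floordiv x 8) 2,
         s.2.2 ++ [PySem.Int.mod (PySem.Int.floordiv x 8) 2])))

def solve_piece_alt (options : List (List Int)) (progress : List (List Int)) (length : Int) : List (List Int) :=
  let p0 := progress.getD 0 []
  let p1 := progress.getD 1 []
  let n : Int := length - (p0.length : Int) + 1
  if n ≤ 0 then [p1]
  else
    ((PySem.List.slice options none (some n)).foldl (fun states row => spStep row states)
        [(PySem.List.pyGetD p0 (-1) 0, PySem.List.pyGetD p1 (-1) 0, p1)]).map
      (fun s => s.2.2)

-- ===== PRECONDITION & SPEC =====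
-- Pre_ excludes the inputs where A's indexing raises (progress shorter than 2, options shorter
-- than the recursion depth, empty progress[0]/progress[1], ref[x] out of range on a reached row).
-- It is slightly narrower than A's exact domain: it also excludes degenerate inputs that avoid
-- the raise only because every branch dies first (e.g. an empty row before the empty progress[0]
-- is indexed, or a dead branch hiding an out-of-range x) — see the cites in claim.json.
def Pre_solve_piece (options : List (List Int)) (progress : List (List Int)) (length : Int) : Prop :=
  2 ≤ progress.length ∧
  (((progress.getD 0 []).length : Int) ≤ length →
    progress.getD 0 [] ≠ [] ∧ progress.getD 1 [] ≠ [] ∧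
    length - ((progress.getD 0 []).length : Int) + 1 ≤ (options.length : Int) ∧
    ∀ r ∈ options.take (length - ((progress.getD 0 []).length : Int) + 1).toNat,
      ∀ x ∈ r, -16 ≤ x ∧ x < 16)

instance (options : List (List Int)) (progress : List (List Int)) (length : Int) :
    Decidable (Pre_solve_piece options progress length) := by
  unfold Pre_solve_piece; infer_instance

def pvWitness_solve_piece : List (List Int) × List (List Int) × Int := ([[3]], ([[1], [0]], 1))

def Spec_solve_piece (options : List (List Int)) (progress : List (List Int)) (length : Int) (out : List (List Int)) : Prop := out = solve_piece_alt options progress length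
instance (options : List (List Int)) (progress : List (List Int)) (length : Int) (out : List (List Int)) : Decidable (Spec_solve_piece options progress length out) := by unfold Spec_solve_piece; infer_instance

-- ===== CLAIM (what is proved, stated in full; the proofs are below) =====
def Claim_equal_solve_piece : Prop := ∀ (options : List (List Int)) (progress : List (List Int)) (length : Int), Dom_solve_piece options progress length → Pre_solve_piece options progress length → Spec_solve_piece options progress length (solve_piece options progress length)

-- ===== LEMMAS AND PROOFS =====

def pvBits (x : Int) : List Int :=
  [PySem.Int.mod x 2, PySem.Int.mod (PySem.Int.floordiv x 2) 2,
   PySem.Int.mod (PySem.Int.floordiv x 4) 2, PySem.Int.mod (PySem.Int.floordiv x 8) 2]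

theorem pvRef_eq (x : Int) (h1 : -16 ≤ x) (h2 : x < 16) :
    (PySem.List.pyGet? pvRef x).getD [] = pvBits x := by
  interval_cases x <;> decide

theorem spLoop_eq (length : Int) (rest : List (List Int)) (p0 p1 : List Int) :
    ∀ (row : List Int) (results : List (List Int)),
      spLoop length rest p0 p1 row results =
        results ++ row.flatMap (fun x =>
          if PySem.List.pyGetD p0 (-1) 0 = ((PySem.List.pyGet? pvRef x).getD []).getD 0 0 ∧
             PySem.List.pyGetD p1 (-1) 0 = ((PySem.List.pyGet? pvRef x).getD []).getD 2 0 then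
            solve_piece rest
              [p0 ++ [((PySem.List.pyGet? pvRef x).getD []).getD 1 0],
               p1 ++ [((PySem.List.pyGet? pvRef x).getD []).getD 3 0]] length
          else []) := by
  intro row
  induction row with
  | nil => intro results; simp [spLoop]
  | cons x xs ih =>
    intro results
    rw [spLoop]
    simp only [List.flatMap_cons]
    split_ifs with h
    · rw [ih, List.append_assoc]
    · rw [ih, List.nil_append]

def spRun (rows : List (List Int)) (S : List (Int × Int × List Int)) : List (Int × Int × List Int) :=
  rows.foldl (fun s row => spStep row s) S

theorem spRun_nil (rows : List (List Int)) : spRun rows [] = [] := by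
  induction rows with
  | nil => rfl
  | cons r rs ih => simp [spRun, spStep, List.foldl_cons] at ih ⊢; exact ih

theorem spStep_append (row : List Int) (S1 S2 : List (Int × Int × List Int)) :
    spStep row (S1 ++ S2) = spStep row S1 ++ spStep row S2 := by
  simp [spStep]

theorem spRun_append (rows : List (List Int)) :
    ∀ S1 S2, spRun rows (S1 ++ S2) = spRun rows S1 ++ spRun rows S2 := by
  induction rows with
  | nil => intro S1 S2; rfl
  | cons r rs ih =>
    intro S1 S2
    simp only [spRun, List.foldl_cons, spStep_append]
    exact ih _ _

theorem spRun_flatMap (rows : List (List Int)) :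
    ∀ S, spRun rows S = S.flatMap (fun s => spRun rows [s]) := by
  intro S
  induction S with
  | nil => simp [spRun_nil]
  | cons s S' ih =>
    have : s :: S' = [s] ++ S' := rfl
    rw [this, spRun_append]
    simp [ih]

theorem flatMap_if_filter {α β : Type} (l : List α) (p : α → Bool) (f : α → List β) :
    l.flatMap (fun x => if p x = true then f x else []) = (l.filter p).flatMap f := by
  induction l with
  | nil => rfl
  | cons x xs ih =>
    by_cases h : p x = true <;> simp [h, ih]

theorem flatMap_congr_mem {α β : Type} (l : List α) (f g : α → List β)
    (h : ∀ x ∈ l, f x = g x) : l.flatMap f = l.flatMap g := by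
  induction l with
  | nil => rfl
  | cons x xs ih =>
    simp only [List.flatMap_cons, h x (by simp), ih (fun y hy => h y (by simp [hy]))]

theorem sp_main (length : Int) :
    ∀ (options : List (List Int)) (p0 p1 : List Int),
      p0 ≠ [] → p1 ≠ [] →
      (((p0.length : Int)) ≤ length →
        length - (p0.length : Int) + 1 ≤ (options.length : Int)) →
      (∀ r ∈ options.take (length - (p0.length : Int) + 1).toNat, ∀ x ∈ r, -16 ≤ x ∧ x < 16) →
      solve_piece options [p0, p1] length =
        (spRun (options.take (length - (p0.length : Int) + 1).toNat)
            [(PySem.List.pyGetD p0 (-1) 0, PySem.List.pyGetD p1 (-1) 0, p1)]).map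
          (fun s => s.2.2) := by
  intro options
  induction options with
  | nil =>
    intro p0 p1 hp0 hp1 hlen _hrange
    by_cases h : (p0.length : Int) ≤ length
    · exfalso; have := hlen h; simp at this; omega
    · rw [solve_piece]
      simp only [List.getD, List.take_nil]
      rw [if_pos (by simpa using (by omega : length < (p0.length : Int)))]
      rfl
  | cons row rest ih =>
    intro p0 p1 hp0 hp1 hlen hrange
    by_cases h : (p0.length : Int) ≤ length
    · -- recursive case: n ≥ 1
      have hn : 1 ≤ length - (p0.length : Int) + 1 := by omega
      have htn : (length - (p0.length : Int) + 1).toNat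
          = (length - ((p0.length : Int) + 1) + 1).toNat + 1 := by omega
      rw [solve_piece]
      rw [if_neg (by simp; omega)]
      rw [spLoop_eq, List.nil_append]
      -- rewrite the take on the RHS
      rw [htn, List.take_succ_cons]
      -- peel one level off the breadth-first run
      have hrun : spRun (row :: rest.take (length - ((p0.length : Int) + 1) + 1).toNat)
            [(PySem.List.pyGetD p0 (-1) 0, PySem.List.pyGetD p1 (-1) 0, p1)]
          = spRun (rest.take (length - ((p0.length : Int) + 1) + 1).toNat)
              (spStep row [(PySem.List.pyGetD p0 (-1) 0, PySem.List.pyGetD p1 (-1) 0, p1)]) := rfl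
      rw [hrun]
      have hrowmem : row ∈ (row :: rest).take (length - (p0.length : Int) + 1).toNat := by
        rw [htn, List.take_succ_cons]; simp
      have hxrange : ∀ x ∈ row, -16 ≤ x ∧ x < 16 := fun x hx => hrange row hrowmem x hx
      -- the single-state step is a filter+map over the row
      have hstep : spStep row [(PySem.List.pyGetD p0 (-1) 0, PySem.List.pyGetD p1 (-1) 0, p1)]
          = (row.filter (fun x =>
              PySem.Int.mod x 2 == PySem.List.pyGetD p0 (-1) 0 &&
              PySem.Int.mod (PySem.Int.floordiv x 4) 2 == PySem.List.pyGetD p1 (-1) 0)).map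
              (fun x =>
                (PySem.Int.mod (PySem.Int.floordiv x 2) 2,
                 PySem.Int.mod (PySem.Int.floordiv x 8) 2,
                 p1 ++ [PySem.Int.mod (PySem.Int.floordiv x 8) 2])) := by
        simp [spStep]
      rw [hstep]
      rw [spRun_flatMap, List.flatMap_map, List.map_flatMap]
      rw [flatMap_congr_mem _ _ (fun x =>
            if (PySem.Int.mod x 2 == PySem.List.pyGetD p0 (-1) 0 &&
                PySem.Int.mod (PySem.Int.floordiv x 4) 2 == PySem.List.pyGetD p1 (-1) 0) = true then
              (spRun (rest.take (length - ((p0.length : Int) + 1) + 1).toNat)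
                [((PySem.Int.mod (PySem.Int.floordiv x 2) 2 : Int),
                  (PySem.Int.mod (PySem.Int.floordiv x 8) 2 : Int),
                  p1 ++ [PySem.Int.mod (PySem.Int.floordiv x 8) 2])]).map (fun s => s.2.2)
            else [])
          ?_, flatMap_if_filter]
      intro x hx
      simp only [List.getD_cons_zero, List.getD_cons_succ]
      have hxr := hxrange x hx
      have hbit := pvRef_eq x hxr.1 hxr.2
      simp only [hbit, pvBits]
      simp only [List.getD_cons_zero, List.getD_cons_succ]
      -- both conditions are the same equalities
      by_cases hc : PySem.Int.mod x 2 = PySem.List.pyGetD p0 (-1) 0 ∧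
          PySem.Int.mod (PySem.Int.floordiv x 4) 2 = PySem.List.pyGetD p1 (-1) 0
      · rw [if_pos (by exact ⟨hc.1.symm, hc.2.symm⟩),
            if_pos (by simp only [Bool.and_eq_true, beq_iff_eq]; exact ⟨hc.1, hc.2⟩)]
        -- apply the induction hypothesis at the child
        have hIH := ih (p0 ++ [PySem.Int.mod (PySem.Int.floordiv x 2) 2])
          (p1 ++ [PySem.Int.mod (PySem.Int.floordiv x 8) 2])
          (by simp) (by simp)
          (by
            intro _
            have h2 := hlen h
            simp only [List.length_cons] at h2
            simp only [List.length_append, List.length_cons, List.length_nil]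
            push_cast at h2 ⊢
            omega)
          (by
            intro r hr y hy
            refine hrange r ?_ y hy
            rw [htn, List.take_succ_cons]
            simp only [List.length_append, List.length_cons, List.length_nil] at hr ⊢
            right
            simpa using hr)
        simp only [List.length_append, List.length_cons, List.length_nil] at hIH
        have harg : ((p0.length + 1 : Nat) : Int) = (p0.length : Int) + 1 := by push_cast; ring
        rw [show length - ((p0.length + 1 : Nat) : Int) + 1
              = length - ((p0.length : Int) + 1) + 1 by push_cast; ring] at hIH
        rw [hIH]
        simp [PySem.List.pyGetD_neg_one_append_singleton]
      · rw [if_neg (by exact fun hcon => hc ⟨hcon.1.symm, hcon.2.symm⟩),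
          if_neg (by
            simp only [Bool.and_eq_true, beq_iff_eq]
            intro hcon
            exact hc hcon)]
    · -- base case: length < len(p0)
      have htn0 : (length - (p0.length : Int) + 1).toNat = 0 := by omega
      rw [solve_piece]
      rw [if_pos (by simpa using (by omega : length < (p0.length : Int)))]
      rw [htn0]
      rfl

theorem solve_piece_progress (options : List (List Int)) (progress : List (List Int)) (length : Int) :
    solve_piece options progress length
      = solve_piece options [progress.getD 0 [], progress.getD 1 []] length := by
  rw [solve_piece.eq_def, solve_piece.eq_def]
  rfl

theorem slice_to_pos (xs : List (List Int)) (n : Int) (h : 0 ≤ n) :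
    PySem.List.slice xs none (some n) = xs.take n.toNat := by
  rw [show n = ((n.toNat : Nat) : Int) by omega]
  exact PySem.List.slice_to_natCast xs n.toNat

-- ===== VERDICT (by name: the statement is the Claim_ definition above) =====
theorem solve_piece_spec : Claim_equal_solve_piece := by
  intro options progress length _hdom hpre
  unfold Spec_solve_piece
  obtain ⟨_hp2, hrec⟩ := hpre
  by_cases h : ((progress.getD 0 []).length : Int) ≤ length
  · obtain ⟨hp0, hp1, hlen, hrange⟩ := hrec h
    rw [solve_piece_progress]
    rw [sp_main length options (progress.getD 0 []) (progress.getD 1 []) hp0 hp1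
          (fun _ => hlen) hrange]
    rw [solve_piece_alt.eq_def]
    simp only []
    rw [if_neg (by omega)]
    rw [slice_to_pos _ _ (by omega)]
    rfl
  · rw [solve_piece.eq_def]
    rw [if_pos (by simpa using (by omega : length < ((progress.getD 0 []).length : Int)))]
    rw [solve_piece_alt.eq_def]
    simp only []
    rw [if_pos (by omega)]
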